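-- pv_equiv track=rewrite | github.com/fnlnandy/PyCompression | text_analyzis.py | get_character_use_stats
-- ===== SOURCE A (Python) =====
-- def get_character_use_stats(to_analyze: str, max_iterations: int = 0) -> dict[str, int]:
--     '''
--         Fonction qui retourne les statistiques d'utilisation de chaque
--         caractère dans un texte.
--     '''
--     use_stats_dict = {}
--     counter = 0
--
--     for character in to_analyze:
--         if max_iterations > 0 and counter >= max_iterations: break
--
--         if character in use_stats_dict.keys():
--             use_stats_dict[character] += 1
--         else:
--             use_stats_dict[character] = 1
--             counter += 1
--
--     return use_stats_dict
-- ===== SOURCE B (Python) =====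
-- def get_character_use_stats(to_analyze: str, max_iterations: int = 0) -> dict[str, int]:
--     # Two-pass: find the cutoff where the distinct-character cap is reached, then count the prefix.
--     cutoff = len(to_analyze)
--     if max_iterations > 0:
--         seen = set()
--         for i, ch in enumerate(to_analyze):
--             if ch not in seen:
--                 seen.add(ch)
--                 if len(seen) == max_iterations:
--                     cutoff = i + 1
--                     break
--     prefix = to_analyze[:cutoff]
--     return {ch: prefix.count(ch) for ch in dict.fromkeys(prefix)}
-- ===== Notes on version B (the rewrite author's own statement) =====
-- stated objective: simpler
-- what changed: Replaces A's single interleaved count-and-cap dict loop with two passes: a cutoff-finding scan using a seen set, then counting the resulting prefix with per-character str.count over dict.fromkeys dedup.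
import Mathlib
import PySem

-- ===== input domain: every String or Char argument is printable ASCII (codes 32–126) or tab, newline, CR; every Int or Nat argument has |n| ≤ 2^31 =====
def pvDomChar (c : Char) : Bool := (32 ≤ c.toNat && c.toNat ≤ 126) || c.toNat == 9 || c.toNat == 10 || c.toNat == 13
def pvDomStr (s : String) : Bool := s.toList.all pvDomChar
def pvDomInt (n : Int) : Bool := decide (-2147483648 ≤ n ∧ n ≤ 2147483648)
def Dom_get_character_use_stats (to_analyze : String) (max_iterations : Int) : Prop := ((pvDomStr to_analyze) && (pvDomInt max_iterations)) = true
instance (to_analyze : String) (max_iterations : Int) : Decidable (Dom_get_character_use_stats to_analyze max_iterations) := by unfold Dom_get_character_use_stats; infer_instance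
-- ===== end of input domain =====

-- B replaces A's single interleaved count-and-cap dict loop by a cutoff-finding pass plus a
-- separate counting pass over the prefix (objective: simpler decomposition; same result).


-- ===== PORT A =====
-- A's loop: state is (use_stats_dict, counter); break when max_iterations > 0 and counter >= max_iterations.
-- Python iterating a str yields 1-character strings, hence keys 'String.singleton c'.
def pvGoA (m : Int) : List Char → PySem.Dict String Int → Int → PySem.Dict String Int
  | [], d, _ => d
  | c :: cs, d, counter =>
    if m > 0 ∧ counter ≥ m then d
    else if d.contains (String.singleton c) then
      pvGoA m cs (d.modify (String.singleton c) 0 (· + 1)) counter   -- use_stats_dict[character] += 1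
    else
      pvGoA m cs (d.insert (String.singleton c) 1) (counter + 1)     -- use_stats_dict[character] = 1; counter += 1

def get_character_use_stats (to_analyze : String) (max_iterations : Int) : List (String × Int) :=
  (pvGoA max_iterations to_analyze.toList PySem.Dict.empty 0).items

-- ===== PORT B =====
-- first pass: walk enumerate(to_analyze) with a seen set; when a new character makes
-- len(seen) == max_iterations, the cutoff is i + 1 and we break; otherwise keep the default.
def pvCutB (m : Int) : List (Int × Char) → PySem.Set Char → Int → Int
  | [], _, dflt => dflt
  | (i, c) :: rest, seen, dflt =>
    if PySem.Set.contains seen c then pvCutB m rest seen dflt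
    else
      let seen' := PySem.Set.add seen c
      if (PySem.Set.len seen' : Int) = m then i + 1 else pvCutB m rest seen' dflt

-- prefix = to_analyze[:cutoff], with cutoff = len(to_analyze) unless the capped scan
-- (run only when max_iterations > 0) broke earlier
def pvPrefixB (cs : List Char) (m : Int) : List Char :=
  PySem.List.slice cs none
    (some (if m > 0 then pvCutB m (PySem.List.enumerate cs) PySem.Set.empty (cs.length : Int)
           else (cs.length : Int)))

def get_character_use_stats_alt (to_analyze : String) (max_iterations : Int) : List (String × Int) :=
  -- {ch: prefix.count(ch) for ch in dict.fromkeys(prefix)}; str.count of a single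
  -- character equals the per-character occurrence count (exact here)
  (PySem.List.dedup (pvPrefixB to_analyze.toList max_iterations)).map
    (fun c => (String.singleton c, ((pvPrefixB to_analyze.toList max_iterations).count c : Int)))

-- ===== PRECONDITION & SPEC =====
def Spec_get_character_use_stats (to_analyze : String) (max_iterations : Int) (out : List (String × Int)) : Prop := out = get_character_use_stats_alt to_analyze max_iterations
instance (to_analyze : String) (max_iterations : Int) (out : List (String × Int)) : Decidable (Spec_get_character_use_stats to_analyze max_iterations out) := by unfold Spec_get_character_use_stats; infer_instance

-- ===== CLAIM (what is proved, stated in full; the proofs are below) =====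
def Claim_equal_get_character_use_stats : Prop := ∀ (to_analyze : String) (max_iterations : Int), Dom_get_character_use_stats to_analyze max_iterations → Spec_get_character_use_stats to_analyze max_iterations (get_character_use_stats to_analyze max_iterations)

-- ===== LEMMAS AND PROOFS =====

-- number of characters A's loop processes before breaking (proof-only helper)
def pvProcLen (m : Int) : List Char → PySem.Set Char → Nat
  | [], _ => 0
  | c :: cs, seen =>
    if m > 0 ∧ (seen.length : Int) ≥ m then 0
    else 1 + pvProcLen m cs (PySem.Set.add seen c)

theorem pvSingleton_injective : Function.Injective String.singleton := by
  intro a b h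
  simpa using congrArg String.toList h

theorem pvInsert_absent {d : PySem.Dict String Int} {k : String}
    (h : d.contains k = false) : d.insert k 1 = d.modify k 0 (· + 1) := by
  simp [PySem.Dict.modify, PySem.Dict.getD_of_not_contains d 0 h]

theorem pvProcLen_stop (m : Int) (cs : List Char) (seen : PySem.Set Char)
    (h : m > 0 ∧ (seen.length : Int) ≥ m) : pvProcLen m cs seen = 0 := by
  cases cs <;> simp [pvProcLen, h]

theorem pvGoA_eq_fold (m : Int) :
    ∀ (cs : List Char) (seen : PySem.Set Char) (d : PySem.Dict String Int),
    (∀ c : Char, d.contains (String.singleton c) = decide (c ∈ seen)) →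
    pvGoA m cs d (seen.length : Int)
      = ((cs.take (pvProcLen m cs seen)).map String.singleton).foldl
          (fun d x => d.modify x 0 (· + 1)) d := by
  intro cs
  induction cs with
  | nil => intro seen d _; simp [pvGoA, pvProcLen]
  | cons c cs ih =>
    intro seen d hc
    by_cases hstop : m > 0 ∧ ((seen.length : Int)) ≥ m
    · simp [pvGoA, pvProcLen, hstop]
    · by_cases hmem : c ∈ seen
      · have hc' : d.contains (String.singleton c) = true := by rw [hc]; simpa using hmem
        have hadd : PySem.Set.add seen c = seen := PySem.Set.add_of_mem hmem
        have hcont : ∀ c' : Char,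
            (d.modify (String.singleton c) 0 (· + 1)).contains (String.singleton c')
              = decide (c' ∈ seen) := by
          intro c'
          rw [PySem.Dict.contains_modify]
          by_cases h : c' = c
          · subst h; simp [hmem]
          · have hne : (String.singleton c' == String.singleton c) = false := by
              simp only [beq_eq_false_iff_ne]; exact fun hh => h (pvSingleton_injective hh)
            simp [hne, hc c']
        simp only [pvGoA, pvProcLen, if_neg hstop, hc', if_true, hadd]
        rw [ih seen _ hcont]
        simp [List.take_succ_cons, Nat.add_comm 1]
      · have hc' : d.contains (String.singleton c) = false := by rw [hc]; simpa using hmem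
        have hadd : PySem.Set.add seen c = seen ++ [c] := PySem.Set.add_of_not_mem hmem
        have hlen : (((seen ++ [c]).length : Int)) = (seen.length : Int) + 1 := by
          simp
        have hcont : ∀ c' : Char,
            (d.insert (String.singleton c) 1).contains (String.singleton c')
              = decide (c' ∈ seen ++ [c]) := by
          intro c'
          rw [PySem.Dict.contains_insert]
          by_cases h : c' = c
          · subst h; simp
          · have hne : (String.singleton c' == String.singleton c) = false := by
              simp only [beq_eq_false_iff_ne]; exact fun hh => h (pvSingleton_injective hh)
            simp [hne, hc c', h]
        simp only [pvGoA, pvProcLen, if_neg hstop, hc', if_false, Bool.false_eq_true, hadd]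
        rw [← hlen, ih (seen ++ [c]) _ (by simpa [hadd] using hcont)]
        rw [pvInsert_absent hc']
        simp [List.take_succ_cons, Nat.add_comm 1]

theorem pvProcLen_nopos (m : Int) (hm : ¬ m > 0) :
    ∀ (cs : List Char) (seen : PySem.Set Char), pvProcLen m cs seen = cs.length := by
  intro cs
  induction cs with
  | nil => intro seen; simp [pvProcLen]
  | cons c cs ih =>
    intro seen
    have h : ¬ (m > 0 ∧ (seen.length : Int) ≥ m) := fun hh => hm hh.1
    simp [pvProcLen, h, ih, Nat.add_comm 1]

theorem pvCutB_eq (m : Int) :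
    ∀ (cs : List Char) (i₀ : Int) (seen : PySem.Set Char),
    m > 0 → (seen.length : Int) < m → seen.Nodup →
    pvCutB m (PySem.List.enumerate cs i₀) seen (i₀ + (cs.length : Int))
      = i₀ + (pvProcLen m cs seen : Int) := by
  intro cs
  induction cs with
  | nil => intro i₀ seen _ _ _; simp [PySem.List.enumerate, pvCutB, pvProcLen]
  | cons c cs ih =>
    intro i₀ seen hm hlt hnd
    have hstop : ¬ (m > 0 ∧ (seen.length : Int) ≥ m) := fun hh => absurd hlt (by omega)
    rw [PySem.List.enumerate]
    by_cases hmem : c ∈ seen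
    · have hcont : PySem.Set.contains seen c = true := by
        rw [PySem.Set.contains_iff]; exact hmem
      have hadd : PySem.Set.add seen c = seen := PySem.Set.add_of_mem hmem
      simp only [pvCutB, hcont, if_true, pvProcLen, if_neg hstop, hadd]
      have harith : i₀ + (((c :: cs).length : Nat) : Int) = (i₀ + 1) + (cs.length : Int) := by
        simp only [List.length_cons]; push_cast; ring
      rw [harith, ih (i₀ + 1) seen hm hlt hnd]
      push_cast; ring
    · have hcont : PySem.Set.contains seen c = false := by
        simp [hmem]
      have hadd : PySem.Set.add seen c = seen ++ [c] := PySem.Set.add_of_not_mem hmem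
      have hnd' : (seen ++ [c]).Nodup := by
        simp only [List.nodup_append, List.nodup_singleton, true_and]
        exact ⟨hnd, fun a ha b hb => by simp only [List.mem_singleton] at hb; subst hb; exact fun he => hmem (he ▸ ha)⟩
      simp only [pvCutB, hcont, Bool.false_eq_true, if_false, pvProcLen, if_neg hstop, hadd,
        PySem.Set.len]
      by_cases hEq : (((seen ++ [c]).length : Nat) : Int) = m
      · rw [if_pos hEq]
        have : pvProcLen m cs (seen ++ [c]) = 0 :=
          pvProcLen_stop m cs _ ⟨hm, le_of_eq hEq.symm⟩
        simp [this]
      · rw [if_neg hEq]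
        have hlt' : (((seen ++ [c]).length : Nat) : Int) < m := by
          simp at hEq ⊢; omega
        have harith : i₀ + (((c :: cs).length : Nat) : Int) = (i₀ + 1) + (cs.length : Int) := by
          simp only [List.length_cons]; push_cast; ring
        rw [harith, ih (i₀ + 1) (seen ++ [c]) hm hlt' hnd']
        push_cast; ring

theorem pvOfList_map_singleton : ∀ (p : List Char),
    PySem.Set.ofList (p.map String.singleton) = (PySem.Set.ofList p).map String.singleton := by
  intro p
  induction p using List.reverseRecOn with
  | nil => simp [PySem.Set.ofList]
  | append_singleton p c ih =>
    rw [List.map_append, List.map_singleton, PySem.Set.ofList_append_singleton,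
      PySem.Set.ofList_append_singleton, ih]
    by_cases hmem : c ∈ PySem.Set.ofList p
    · rw [PySem.Set.add_of_mem hmem, PySem.Set.add_of_mem (List.mem_map_of_mem hmem)]
    · rw [PySem.Set.add_of_not_mem hmem, PySem.Set.add_of_not_mem (by
        intro hh
        obtain ⟨c', hc', he⟩ := List.mem_map.mp hh
        exact hmem (pvSingleton_injective he ▸ hc')), List.map_append, List.map_singleton]

theorem pvCutoff_eq (m : Int) (cs : List Char) :
    (if m > 0 then pvCutB m (PySem.List.enumerate cs) PySem.Set.empty (cs.length : Int)
     else (cs.length : Int)) = (pvProcLen m cs PySem.Set.empty : Int) := by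
  by_cases hm : m > 0
  · rw [if_pos hm]
    have := pvCutB_eq m cs 0 PySem.Set.empty hm (by simpa [PySem.Set.empty] using hm)
      (by simp [PySem.Set.empty])
    simpa [PySem.List.enumerate] using this
  · rw [if_neg hm, pvProcLen_nopos m hm cs PySem.Set.empty]

-- ===== VERDICT (by name: the statement is the Claim_ definition above) =====
theorem get_character_use_stats_spec : Claim_equal_get_character_use_stats := by
  intro s m _
  unfold Spec_get_character_use_stats get_character_use_stats get_character_use_stats_alt pvPrefixB
  rw [pvCutoff_eq]
  rw [PySem.List.slice_to _ (by positivity)]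
  have hK : (pvProcLen m s.toList PySem.Set.empty : Int).toNat
      = pvProcLen m s.toList PySem.Set.empty := Int.toNat_natCast _
  rw [hK]
  have h0 : ((0 : Int)) = (((PySem.Set.empty : PySem.Set Char).length : Nat) : Int) := by
    simp [PySem.Set.empty]
  rw [h0, pvGoA_eq_fold m s.toList PySem.Set.empty PySem.Dict.empty
    (by intro c; simp [PySem.Dict.contains_empty, PySem.Set.empty])]
  rw [← PySem.Dict.counter_eq_foldl, PySem.Dict.items_counter, PySem.List.dedup_eq_ofList,
    pvOfList_map_singleton]
  rw [List.map_map]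
  apply List.map_congr_left
  intro c _
  simp only [Function.comp_apply, Prod.mk.injEq, true_and]
  rw [List.count_map_of_injective _ _ pvSingleton_injective]
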